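-- pv_equiv track=rewrite | github.com/1749352844/digital_match | answer.py | loop_value
-- ===== SOURCE A (Python) =====
-- def loop_value(mine, num):
--     """遍历取值"""
--     # 初始化 -- 匹配值 & 最小值 & 结果值
--     eq_val, min_val, rel_val = num, mine[0], None
--     for item in mine:
--         # 遍历到匹配值则中断循环
--         if item == eq_val:
--             rel_val = item
--             break
--         # 遍历到大于匹配值的则替换
--         elif item > eq_val:
--             if rel_val is None:
--                 rel_val = item
--             elif item < rel_val:
--                 rel_val = item
--         # 更新最小值(结果值为空，则使用最小值)
--         if item < min_val:
--             min_val = item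
--     return eq_val, min_val, rel_val
-- ===== SOURCE B (Python) =====
-- def loop_value(mine, num):
--     """遍历取值 (index/slice decomposition instead of one accumulator loop)"""
--     try:
--         k = mine.index(num)
--         matched = True
--     except ValueError:
--         k = len(mine)
--         matched = False
--     prefix = mine[:k]
--     min_val = min(prefix) if prefix else mine[0]
--     rel_val = num if matched else min((x for x in prefix if x > num), default=None)
--     return num, min_val, rel_val
-- ===== Notes on version B (the rewrite author's own statement) =====
-- stated objective: simpler
-- what changed: B replaces A's single accumulator loop (running min, running smallest-greater, break on match) by a decomposition: find the index of the first exact match, slice the prefix before it, and compute min(prefix) and min of the >num elements of the prefix with the builtins.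
-- outside the precondition, e.g. on loop_value([], 3): A raises IndexError, B raises IndexError
import Mathlib
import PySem

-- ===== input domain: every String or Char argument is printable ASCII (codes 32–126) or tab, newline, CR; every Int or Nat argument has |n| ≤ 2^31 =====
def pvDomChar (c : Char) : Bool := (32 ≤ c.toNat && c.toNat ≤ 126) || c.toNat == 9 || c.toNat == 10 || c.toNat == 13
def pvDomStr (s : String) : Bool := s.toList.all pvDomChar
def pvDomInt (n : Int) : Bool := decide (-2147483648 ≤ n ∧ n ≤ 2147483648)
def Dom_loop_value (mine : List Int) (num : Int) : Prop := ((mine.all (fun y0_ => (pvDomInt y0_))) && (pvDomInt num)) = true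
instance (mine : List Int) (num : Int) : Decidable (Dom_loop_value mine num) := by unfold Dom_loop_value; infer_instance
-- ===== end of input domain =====

-- B replaces A's single accumulator loop by an index/slice decomposition (find the first
-- match, slice the prefix, take builtin mins over it); objective: simpler, same cost.

-- ===== PORT A =====
-- the for-loop of A: state = (eq_val fixed, min_val, rel_val); break on item == eq_val
def loopA : List Int → Int → Int → Option Int → Int × Int × Option Int
  | [], eq, mn, rel => (eq, mn, rel)
  | item :: rest, eq, mn, rel =>
    if item = eq then (eq, mn, some item)
    else
      let rel' : Option Int :=
        if item > eq then
          match rel with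
          | none => some item
          | some r => if item < r then some item else some r
        else rel
      let mn' := if item < mn then item else mn
      loopA rest eq mn' rel'

def loop_value (mine : List Int) (num : Int) : Int × Int × Option Int :=
  -- mine[0] raises IndexError on empty mine: excluded by Pre_loop_value
  loopA mine num (PySem.List.pyGetD mine 0 0) none

-- ===== PORT B =====
def loop_value_alt (mine : List Int) (num : Int) : Int × Int × Option Int :=
  let idx := PySem.List.index? mine num          -- mine.index(num) / ValueError
  let k : Nat := idx.getD mine.length
  let matched := idx.isSome
  let pre := PySem.List.slice mine (some 0) (some (k : Int))   -- mine[:k]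
  let min_val :=
    match pre with
    | [] => PySem.List.pyGetD mine 0 0           -- mine[0]; IndexError excluded by Pre_
    | x :: t => ((PySem.List.min? (x :: t) (fun y => y)).getD 0)  -- min(prefix), prefix ≠ []
  let rel_val :=
    if matched then some num
    else PySem.List.min? (pre.filter (fun x => x > num)) (fun y => y)  -- min(gen, default=None)
  (num, min_val, rel_val)

-- ===== PRECONDITION & SPEC =====
-- Pre_ excludes only the empty list, on which both A and B raise IndexError at mine[0].
def Pre_loop_value (mine : List Int) (num : Int) : Prop := mine ≠ []
instance (mine : List Int) (num : Int) : Decidable (Pre_loop_value mine num) := by unfold Pre_loop_value; infer_instance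
def pvWitness_loop_value : List Int × Int := ([3, 1, 5], 4)

def Spec_loop_value (mine : List Int) (num : Int) (out : Int × Int × Option Int) : Prop := out = loop_value_alt mine num
instance (mine : List Int) (num : Int) (out : Int × Int × Option Int) : Decidable (Spec_loop_value mine num out) := by unfold Spec_loop_value; infer_instance

-- ===== CLAIM (what is proved, stated in full; the proofs are below) =====
def Claim_equal_loop_value : Prop := ∀ (mine : List Int) (num : Int), Dom_loop_value mine num → Pre_loop_value mine num → Spec_loop_value mine num (loop_value mine num)

-- ===== LEMMAS AND PROOFS =====

-- A's rel_val update, as a fold step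
def relStep (r : Option Int) (x : Int) : Option Int :=
  match r with
  | none => some x
  | some r => if x < r then some x else some r

lemma relStep_some (r x : Int) : relStep (some r) x = some (min r x) := by
  simp only [relStep]; split_ifs with h <;> simp [min_def] <;> omega

lemma foldl_relStep_some (t : List Int) (r : Int) :
    t.foldl relStep (some r) = some (t.foldl min r) := by
  induction t generalizing r with
  | nil => rfl
  | cons x t ih => simp [List.foldl_cons, relStep_some, ih]

lemma foldl_relStep_eq_min? (xs : List Int) :
    xs.foldl relStep none = PySem.List.min? xs (fun y => y) := by
  cases xs with
  | nil => rfl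
  | cons x t =>
    simp only [List.foldl_cons, relStep, PySem.List.min?_id_cons]
    exact foldl_relStep_some t x

-- characterisation of A's loop
lemma loopA_eq (l : List Int) (eq mn : Int) (rel : Option Int) :
    loopA l eq mn rel =
      (eq, (l.takeWhile (· ≠ eq)).foldl min mn,
        if eq ∈ l then some eq
        else ((l.takeWhile (· ≠ eq)).filter (· > eq)).foldl relStep rel) := by
  induction l generalizing mn rel with
  | nil => simp [loopA]
  | cons x rest ih =>
    by_cases hx : x = eq
    · subst hx
      simp [loopA, List.takeWhile]
    · have htw : (x :: rest).takeWhile (· ≠ eq) = x :: rest.takeWhile (· ≠ eq) := by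
        simp [List.takeWhile, hx]
      have hmem : (eq ∈ x :: rest) ↔ eq ∈ rest := by
        simp [List.mem_cons]; intro h; exact absurd h.symm hx
      have hmin : (if x < mn then x else mn) = min mn x := by
        simp [min_def]; split_ifs <;> omega
      simp only [loopA, if_neg hx, htw, List.foldl_cons, List.filter_cons, hmem, hmin]
      rw [ih]
      by_cases hgt : x > eq
      · simp [hgt, relStep]
      · simp [hgt]

lemma takeWhile_stop (pre suf : List Int) (num : Int) (hnp : num ∉ pre) :
    (pre ++ num :: suf).takeWhile (· ≠ num) = pre := by
  induction pre with
  | nil => simp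
  | cons a t ih =>
    have ha : a ≠ num := fun h => hnp (h ▸ List.mem_cons_self)
    have ht : num ∉ t := fun h => hnp (List.mem_cons_of_mem a h)
    simp [ha]
    simpa using ih ht

-- the prefix B slices out is A's takeWhile prefix
lemma take_k_eq_takeWhile (mine : List Int) (num : Int) :
    mine.take ((PySem.List.index? mine num).getD mine.length)
      = mine.takeWhile (· ≠ num) := by
  cases hidx : PySem.List.index? mine num with
  | none =>
    have hnm : num ∉ mine := (PySem.List.index?_eq_none_iff mine num).mp hidx
    simp only [Option.getD, List.take_length]
    symm
    rw [List.takeWhile_eq_self_iff]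
    intro a ha
    simp only [decide_eq_true_eq]
    intro h; exact hnm (h ▸ ha)
  | some k =>
    obtain ⟨pre, suf, hsplit, hlen, hnp⟩ := (PySem.List.index?_eq_some_iff mine num k).mp hidx
    subst hsplit
    simp only [Option.getD, ← hlen]
    rw [List.take_left]
    exact (takeWhile_stop pre suf num hnp).symm

lemma takeWhile_head (mine : List Int) (num x : Int) (t : List Int)
    (h : mine.takeWhile (· ≠ num) = x :: t) :
    PySem.List.pyGetD mine 0 0 = x := by
  cases mine with
  | nil => simp [List.takeWhile] at h
  | cons y rest =>
    have : y = x := by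
      by_cases hy : y = num
      · simp [List.takeWhile, hy] at h
      · simp [List.takeWhile, hy] at h; exact h.1
    simp [PySem.List.pyGetD_zero_cons, this]

-- ===== VERDICT (by name: the statement is the Claim_ definition above) =====
theorem loop_value_spec : Claim_equal_loop_value := by
  intro mine num _ hpre
  unfold Spec_loop_value loop_value loop_value_alt
  rw [loopA_eq]
  have hslice : PySem.List.slice mine (some (0:Int))
      (some (((PySem.List.index? mine num).getD mine.length : Nat) : Int))
        = mine.takeWhile (· ≠ num) := by
    rw [PySem.List.slice_zero_start, PySem.List.slice_to_natCast, take_k_eq_takeWhile]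
  have hmatched : (PySem.List.index? mine num).isSome = (num ∈ mine) := by
    simp
  simp only [hslice, hmatched]
  refine Prod.ext rfl (Prod.ext ?_ ?_)
  · -- min_val
    cases hp : mine.takeWhile (· ≠ num) with
    | nil => simp
    | cons x t =>
      have hx := takeWhile_head mine num x t hp
      simp only [List.foldl_cons, hx, min_self, PySem.List.min?_id_cons, Option.getD_some]
  · -- rel_val
    by_cases hm : num ∈ mine
    · simp [hm]
    · simp [hm, foldl_relStep_eq_min?]
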